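-- pv_equiv track=rewrite | github.com/uSaHx/practica_0207_OussamaRouidjali | ejercicio6.py | dec_bin
-- ===== SOURCE A (Python) =====
-- def dec_bin(decimal):
--     """"
--     Esta funcion convierte el numero decimal introducido a su equivalente en binario
--
--     Parametros:
--         -decimal= es el numero que introduce el usuario para ser convertido a binario
--     Salidas:
--         -binraio= es el deciaml numero ya convertido a binario
--     """
--     binario = 0
--     multiply = 1
--     while decimal != 0:
--         binario = binario + decimal % 2 * multiply
--         decimal //= 2
--         multiply *= 10
--     return binario
-- ===== SOURCE B (Python) =====
-- def dec_bin(decimal):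
--     bits = []
--     while decimal != 0:
--         bits.append(decimal & 1)
--         decimal >>= 1
--     result = 0
--     for b in reversed(bits):
--         result = result * 10 + b
--     return result
-- ===== Notes on version B (the rewrite author's own statement) =====
-- stated objective: alternative
-- what changed: Replaces the single-pass accumulation with a maintained power-of-ten multiplier by two staged passes: first extract the bit list LSB-first with shift-and-mask, then Horner-fold it MSB-first (result = result*10 + bit), so no power accumulator and no mod/floordiv arithmetic remain.
import Mathlib
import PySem

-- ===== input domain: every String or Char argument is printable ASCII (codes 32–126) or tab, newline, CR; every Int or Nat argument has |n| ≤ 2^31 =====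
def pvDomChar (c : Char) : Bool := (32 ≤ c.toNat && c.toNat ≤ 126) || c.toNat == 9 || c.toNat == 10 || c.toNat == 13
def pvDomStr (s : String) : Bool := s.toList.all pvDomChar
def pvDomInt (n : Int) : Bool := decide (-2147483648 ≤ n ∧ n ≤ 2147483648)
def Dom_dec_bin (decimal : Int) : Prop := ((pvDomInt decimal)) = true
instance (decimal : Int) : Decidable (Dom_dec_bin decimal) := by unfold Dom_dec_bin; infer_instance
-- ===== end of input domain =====

-- B replaces A's single-pass power-of-ten accumulation by two staged passes (extract the bit list, then Horner-fold it MSB-first); return value proved equal on 0 ≤ decimal.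


-- ===== PORT A =====
-- while decimal != 0: binario += decimal % 2 * multiply; decimal //= 2; multiply *= 10
-- The loop guard is written `0 < decimal`: on Pre_ (0 ≤ decimal) this is exactly Python's
-- `decimal != 0`; for decimal < 0 Python never terminates (outside Pre_), so the guard only
-- makes the recursion total there.
def decBinLoop (decimal binario multiply : Int) : Int :=
  if h : 0 < decimal then
    decBinLoop (PySem.Int.floordiv decimal 2)
      (binario + PySem.Int.mod decimal 2 * multiply) (multiply * 10)
  else binario
termination_by decimal.toNat
decreasing_by
  have h2 : PySem.Int.floordiv decimal 2 = decimal / 2 :=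
    PySem.Int.floordiv_eq_ediv_of_pos (by omega)
  rw [h2]; omega

def dec_bin (decimal : Int) : Int := decBinLoop decimal 0 1

-- ===== PORT B =====
-- pass 1: while decimal != 0: bits.append(decimal & 1); decimal >>= 1
-- (same guard remark as for A: `0 < decimal` coincides with Python's `decimal != 0` on Pre_;
-- on decimal < 0 Python B recurses forever, outside Pre_)
def bitsLoop (decimal : Int) (bits : List Int) : List Int :=
  if _h : 0 < decimal then
    bitsLoop (decimal >>> (1 : Nat)) (bits ++ [PySem.Int.band decimal 1])
  else bits
termination_by decimal.toNat
decreasing_by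
  have h2 : decimal >>> (1 : Nat) = decimal / 2 := Int.shiftRight_eq_div_pow decimal 1 ▸ by norm_num
  rw [h2]; omega

-- pass 2: result = 0; for b in reversed(bits): result = result * 10 + b
def dec_bin_alt (decimal : Int) : Int :=
  ((bitsLoop decimal []).reverse).foldl (fun result b => result * 10 + b) 0

-- ===== PRECONDITION & SPEC =====
-- Pre_ excludes decimal < 0, where Python A loops forever (and Python B recurses forever): neither returns.
def Pre_dec_bin (decimal : Int) : Prop := 0 ≤ decimal
instance (decimal : Int) : Decidable (Pre_dec_bin decimal) := by unfold Pre_dec_bin; infer_instance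
def pvWitness_dec_bin : Int := 5

def Spec_dec_bin (decimal : Int) (out : Int) : Prop := out = dec_bin_alt decimal
instance (decimal : Int) (out : Int) : Decidable (Spec_dec_bin decimal out) := by unfold Spec_dec_bin; infer_instance

-- ===== CLAIM (what is proved, stated in full; the proofs are below) =====
def Claim_equal_dec_bin : Prop := ∀ (decimal : Int), Dom_dec_bin decimal → Pre_dec_bin decimal → Spec_dec_bin decimal (dec_bin decimal)

-- ===== LEMMAS AND PROOFS =====

-- the packed-binary value, defined on Nat: pack 0 = 0, pack n = n % 2 + 10 * pack (n / 2)
def pack : Nat → Int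
  | 0 => 0
  | (n+1) => ((n+1) % 2 : Nat) + 10 * pack ((n+1) / 2)
decreasing_by omega

theorem pack_pos (n : Nat) (h : 0 < n) : pack n = ((n % 2 : Nat) : Int) + 10 * pack (n / 2) := by
  cases n with
  | zero => omega
  | succ m => rw [pack]

theorem decBinLoop_eq (n : Nat) : ∀ b m : Int, decBinLoop (n : Int) b m = b + m * pack n := by
  induction n using Nat.strong_induction_on with
  | _ n ih =>
    intro b m
    rcases Nat.eq_zero_or_pos n with h0 | h0
    · subst h0; rw [decBinLoop, pack]; simp
    · rw [decBinLoop]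
      have hpos : (0:Int) < (n:Int) := by exact_mod_cast h0
      rw [dif_pos hpos]
      have hd : PySem.Int.floordiv (n : Int) 2 = ((n / 2 : Nat) : Int) :=
        PySem.Int.floordiv_natCast n 2
      have hm : PySem.Int.mod (n : Int) 2 = ((n % 2 : Nat) : Int) :=
        PySem.Int.mod_natCast n 2
      rw [hd, hm, ih (n / 2) (by omega), pack_pos n h0]
      ring

-- the LSB-first bit list of n
def lsbBits : Nat → List Int
  | 0 => []
  | (n+1) => (((n+1) % 2 : Nat) : Int) :: lsbBits ((n+1) / 2)
decreasing_by omega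

theorem lsbBits_pos (n : Nat) (h : 0 < n) :
    lsbBits n = (((n % 2 : Nat) : Int)) :: lsbBits (n / 2) := by
  cases n with
  | zero => omega
  | succ m => rw [lsbBits]

theorem bitsLoop_eq (n : Nat) : ∀ bits : List Int, bitsLoop (n : Int) bits = bits ++ lsbBits n := by
  induction n using Nat.strong_induction_on with
  | _ n ih =>
    intro bits
    rcases Nat.eq_zero_or_pos n with h0 | h0
    · subst h0; rw [bitsLoop, lsbBits]; simp
    · rw [bitsLoop]
      have hpos : (0:Int) < (n:Int) := by exact_mod_cast h0
      rw [dif_pos hpos]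
      have hs : ((n : Int) >>> (1 : Nat)) = ((n / 2 : Nat) : Int) := by
        rw [Int.shiftRight_eq_div_pow]; norm_num
      have hb : PySem.Int.band (n : Int) 1 = ((n % 2 : Nat) : Int) := by
        rw [show ((1:Int) = ((1:Nat):Int)) from rfl, PySem.Int.band_natCast,
          Nat.and_one_is_mod]
      rw [hs, hb, ih (n / 2) (by omega), lsbBits_pos n h0]
      simp

-- the Horner fold over the reversed bit list is exactly pack
theorem horner_reverse_lsbBits (n : Nat) :
    ((lsbBits n).reverse).foldl (fun result b => result * 10 + b) 0 = pack n := by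
  induction n using Nat.strong_induction_on with
  | _ n ih =>
    rcases Nat.eq_zero_or_pos n with h0 | h0
    · subst h0; rw [lsbBits, pack]; rfl
    · rw [lsbBits_pos n h0, List.reverse_cons, List.foldl_append, ih (n / 2) (by omega),
        pack_pos n h0]
      simp; ring

-- ===== VERDICT (by name: the statement is the Claim_ definition above) =====
theorem dec_bin_spec : Claim_equal_dec_bin := by
  intro decimal _ hpre
  unfold Spec_dec_bin dec_bin dec_bin_alt
  obtain ⟨m, rfl⟩ : ∃ m : Nat, decimal = (m : Int) :=
    ⟨decimal.toNat, (Int.toNat_of_nonneg hpre).symm⟩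
  rw [decBinLoop_eq m 0 1, bitsLoop_eq m [], List.nil_append, horner_reverse_lsbBits m]
  ring
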